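-- pv_equiv track=rewrite | github.com/LautaroAntriolo/AP-Curso-Python-1Q2024 | Clase5_Scripts/capsula/main.py | cantNumeros
-- ===== SOURCE A (Python) =====
-- def cantNumeros(lista):
--     existe= {}
--     for numero in lista:
--         if numero in existe:
--             existe[numero]+=1
--         else:
--             existe[numero]= 1
--     orden = dict(sorted(existe.items(), key=lambda item: item[1], reverse=True))
--     return orden
-- ===== SOURCE B (Python) =====
-- def cantNumeros(lista):
--     # Count occurrences (first-appearance order), then emit by a bucket
--     # (counting) pass over count values from the maximum down, instead of
--     # a comparison sort; ties keep first-appearance order, like the stable sort.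
--     counts = {}
--     for n in lista:
--         counts[n] = counts.get(n, 0) + 1
--     buckets = {}
--     for k, c in counts.items():
--         buckets.setdefault(c, []).append(k)
--     res = {}
--     for c in range(max(buckets, default=0), 0, -1):
--         for k in buckets.get(c, []):
--             res[k] = c
--     return res
-- ===== Notes on version B (the rewrite author's own statement) =====
-- stated objective: alternative
-- what changed: Replaces the comparison sort of the count items by a bucket (counting) pass: keys are appended to buckets indexed by their count and emitted from the maximum count down to 1, preserving first-appearance order within equal counts exactly as the stable sort does.
import Mathlib
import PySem

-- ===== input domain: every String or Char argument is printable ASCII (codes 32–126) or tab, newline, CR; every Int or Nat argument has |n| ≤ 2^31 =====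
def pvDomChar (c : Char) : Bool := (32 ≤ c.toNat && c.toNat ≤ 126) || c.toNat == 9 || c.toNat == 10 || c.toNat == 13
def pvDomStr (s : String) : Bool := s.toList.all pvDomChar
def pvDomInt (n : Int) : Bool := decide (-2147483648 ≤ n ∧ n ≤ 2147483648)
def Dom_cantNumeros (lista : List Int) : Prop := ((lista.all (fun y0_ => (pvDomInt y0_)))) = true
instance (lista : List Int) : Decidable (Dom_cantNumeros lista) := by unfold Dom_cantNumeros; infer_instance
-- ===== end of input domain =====

-- B replaces the comparison sort by a bucket pass over count values (max down to 1),
-- keeping first-appearance order inside each bucket, as the stable sort does (objective: alternative).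

-- ===== PORT A =====
def cantNumeros (lista : List Int) : List (Int × Int) :=
  let existe : PySem.Dict Int Int :=
    lista.foldl (fun d numero =>
      if d.contains numero then d.modify numero 0 (· + 1) else d.insert numero 1)
      PySem.Dict.empty
  (PySem.Dict.ofList (PySem.List.sorted existe.items (fun item => item.2) true)).items

-- ===== PORT B =====
def cantNumeros_alt (lista : List Int) : List (Int × Int) :=
  let counts : PySem.Dict Int Int :=
    lista.foldl (fun d n => d.insert n (d.getD n 0 + 1)) PySem.Dict.empty
  -- buckets.setdefault(c, []).append(k) ported value-exactly as insert of the appended list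
  let buckets : PySem.Dict Int (List Int) :=
    counts.items.foldl (fun d p => d.insert p.2 (d.getD p.2 [] ++ [p.1])) PySem.Dict.empty
  let mx : Int := PySem.List.maxD buckets.keys (fun c => c) 0
  let res : PySem.Dict Int Int :=
    (PySem.List.pyRange mx 0 (-1)).foldl (fun r c =>
      (buckets.getD c []).foldl (fun r k => r.insert k c) r) PySem.Dict.empty
  res.items

-- ===== PRECONDITION & SPEC =====
def Spec_cantNumeros (lista : List Int) (out : List (Int × Int)) : Prop := out = cantNumeros_alt lista
instance (lista : List Int) (out : List (Int × Int)) : Decidable (Spec_cantNumeros lista out) := by unfold Spec_cantNumeros; infer_instance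

-- ===== CLAIM (what is proved, stated in full; the proofs are below) =====
def Claim_equal_cantNumeros : Prop := ∀ (lista : List Int), Dom_cantNumeros lista → Spec_cantNumeros lista (cantNumeros lista)

-- ===== LEMMAS AND PROOFS =====

/-- The "bucketed" arrangement of `l`: for each `c` of `ks` in turn, the elements
of `l` whose second component is `c`, in their order in `l`. -/
def pvGrouped (ks : List Int) (l : List (Int × Int)) : List (Int × Int) :=
  ks.flatMap (fun c => l.filter (fun p => p.2 == c))

lemma pvGrouped_nil (ks : List Int) : pvGrouped ks [] = [] := by
  simp [pvGrouped]

lemma pvGrouped_cons (c : Int) (ks : List Int) (l : List (Int × Int)) :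
    pvGrouped (c :: ks) l = l.filter (fun p => p.2 == c) ++ pvGrouped ks l := by
  simp [pvGrouped]

lemma pvGrouped_append_single_not_mem (ks : List Int) (l : List (Int × Int))
    (x : Int × Int) (hx : x.2 ∉ ks) :
    pvGrouped ks (l ++ [x]) = pvGrouped ks l := by
  unfold pvGrouped
  refine List.flatMap_congr (fun c hc => ?_)
  rw [List.filter_append]
  have hne : ¬ x.2 = c := fun h => hx (h ▸ hc)
  simp [hne]

lemma pv_insertBy_append {α : Type} (before : α → α → Bool) (x : α)
    (as bs : List α) (h : ∀ y ∈ as, before x y = false) :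
    PySem.List.insertBy before x (as ++ bs) = as ++ PySem.List.insertBy before x bs := by
  induction as with
  | nil => simp
  | cons a as ih =>
      have ha : before x a = false := h a (List.mem_cons_self ..)
      simp only [List.cons_append, PySem.List.insertBy, ha]
      simp only [Bool.false_eq_true, if_false, List.cons_inj_right]
      exact ih (fun y hy => h y (List.mem_cons_of_mem _ hy))

lemma pv_insertBy_front {α : Type} (before : α → α → Bool) (x : α)
    (bs : List α) (h : ∀ y ∈ bs, before x y = true) :
    PySem.List.insertBy before x bs = x :: bs := by
  cases bs with
  | nil => rfl
  | cons b bs =>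
      have hb : before x b = true := h b (List.mem_cons_self ..)
      simp [PySem.List.insertBy, hb]

lemma pv_step (ks : List Int) (hks : ks.Pairwise (· > ·))
    (x : Int × Int) (hx : x.2 ∈ ks) (l : List (Int × Int)) :
    PySem.List.insertBy (fun a b => decide (b.2 < a.2)) x (pvGrouped ks l)
      = pvGrouped ks (l ++ [x]) := by
  induction ks generalizing l with
  | nil => cases hx
  | cons c ks ih =>
      have hgt : ∀ c' ∈ ks, c > c' := (List.pairwise_cons.mp hks).1
      have htail : ks.Pairwise (· > ·) := (List.pairwise_cons.mp hks).2
      have hgrp := pvGrouped_cons c ks l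
      by_cases hxc : x.2 = c
      · -- x goes right after the c-bucket, in front of all smaller buckets
        have hskip : ∀ y ∈ l.filter (fun p => p.2 == c),
            (fun a b => decide (b.2 < a.2)) x y = false := by
          intro y hy
          have : y.2 = c := by
            have := (List.mem_filter.mp hy).2
            exact beq_iff_eq.mp this
          simp [this, hxc]
        have hfront : ∀ y ∈ pvGrouped ks l,
            (fun a b => decide (b.2 < a.2)) x y = true := by
          intro y hy
          obtain ⟨c', hc', hy'⟩ := List.mem_flatMap.mp hy
          have hy2 : y.2 = c' := beq_iff_eq.mp (List.mem_filter.mp hy').2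
          have : y.2 < x.2 := by rw [hy2, hxc]; exact hgt c' hc'
          simpa using this
        rw [hgrp, pv_insertBy_append _ _ _ _ hskip, pv_insertBy_front _ _ _ hfront]
        have hnot : x.2 ∉ ks := fun h => absurd (hgt _ h) (by simp [hxc])
        have h1 : pvGrouped ks (l ++ [x]) = pvGrouped ks l :=
          pvGrouped_append_single_not_mem ks l x hnot
        have h2 : (l ++ [x]).filter (fun p => p.2 == c)
            = l.filter (fun p => p.2 == c) ++ [x] := by
          rw [List.filter_append]
          simp [hxc]
        rw [pvGrouped_cons, h1, h2]
        simp
      · -- x belongs to a smaller bucket: skip the whole c-bucket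
        have hx' : x.2 ∈ ks := by
          cases hx with
          | head => exact absurd rfl hxc
          | tail _ h => exact h
        have hskip : ∀ y ∈ l.filter (fun p => p.2 == c),
            (fun a b => decide (b.2 < a.2)) x y = false := by
          intro y hy
          have hy2 : y.2 = c := beq_iff_eq.mp (List.mem_filter.mp hy).2
          have : ¬ y.2 < x.2 := by
            rw [hy2]
            exact not_lt_of_gt (hgt _ hx')
          simpa using this
        rw [hgrp, pv_insertBy_append _ _ _ _ hskip, ih htail hx' l]
        have h2 : (l ++ [x]).filter (fun p => p.2 == c)
            = l.filter (fun p => p.2 == c) := by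
          rw [List.filter_append]
          simp [hxc]
        rw [pvGrouped_cons, h2]

lemma pv_fold (ks : List Int) (hks : ks.Pairwise (· > ·)) (m : List (Int × Int))
    (hm : ∀ p ∈ m, p.2 ∈ ks) :
    ∀ l : List (Int × Int),
      m.foldl (fun acc x => PySem.List.insertBy (fun a b => decide (b.2 < a.2)) x acc)
        (pvGrouped ks l) = pvGrouped ks (l ++ m) := by
  induction m with
  | nil => intro l; simp
  | cons x m ih =>
      intro l
      have hx : x.2 ∈ ks := hm x (List.mem_cons_self ..)
      have hm' : ∀ p ∈ m, p.2 ∈ ks := fun p hp => hm p (List.mem_cons_of_mem _ hp)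
      simp only [List.foldl_cons]
      rw [pv_step ks hks x hx l, ih hm' (l ++ [x])]
      simp

lemma pv_sorted_eq (ks : List Int) (cs : List (Int × Int))
    (hks : ks.Pairwise (· > ·)) (hm : ∀ p ∈ cs, p.2 ∈ ks) :
    PySem.List.sorted cs (fun p => p.2) true = pvGrouped ks cs := by
  rw [PySem.List.sorted_rev_eq_foldl_insertBy]
  have := pv_fold ks hks cs hm []
  rw [pvGrouped_nil] at this
  simpa using this

lemma pv_countA (lista : List Int) :
    lista.foldl (fun d numero =>
        if d.contains numero then d.modify numero 0 (· + 1) else d.insert numero 1)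
      PySem.Dict.empty = PySem.Dict.counter lista := by
  rw [PySem.Dict.counter_eq_foldl]
  have hfn : (fun (d : PySem.Dict Int Int) numero =>
      if d.contains numero then d.modify numero 0 (· + 1) else d.insert numero 1)
      = fun d n => d.modify n 0 (· + 1) := by
    funext d n
    by_cases h : d.contains n
    · simp [h]
    · simp only [h, Bool.false_eq_true, if_false, PySem.Dict.modify]
      rw [PySem.Dict.getD_of_not_contains d 0 (by simpa using h)]
      norm_num
  rw [hfn]

lemma pv_items_update_fresh (l : List (Int × Int)) (h : (l.map (fun p => p.1)).Nodup) :
    ((PySem.Dict.empty : PySem.Dict Int Int).update l).items = l := by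
  have := PySem.Dict.items_foldl_insert_fresh l (fun p => p.1) (fun p => p.2)
    PySem.Dict.empty (fun a _ => PySem.Dict.contains_empty _) h
  simpa [PySem.Dict.update, PySem.Dict.items] using this

lemma pv_bucket (cs : List (Int × Int)) (c : Int) :
    ((cs.foldl (fun d p => d.insert p.2 (d.getD p.2 [] ++ [p.1]))
        (PySem.Dict.empty : PySem.Dict Int (List Int)))).getD c []
      = (cs.filter (fun p => p.2 == c)).map (fun p => p.1) := by
  have h1 : (cs.foldl (fun d p => d.insert p.2 (d.getD p.2 [] ++ [p.1]))
        (PySem.Dict.empty : PySem.Dict Int (List Int)))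
      = (cs.map (fun p => (p.2, p.1))).foldl
          (fun d q => d.modify q.1 [] (· ++ [q.2])) PySem.Dict.empty := by
    rw [List.foldl_map]
    rfl
  rw [h1, PySem.Dict.getD_foldl_modify_append, List.filter_map]
  simp [Function.comp_def, List.map_map]

lemma pv_nested (g : Int → List Int) (ls : List Int) (r : PySem.Dict Int Int) :
    ls.foldl (fun r c => (g c).foldl (fun r k => r.insert k c) r) r
      = (ls.flatMap (fun c => (g c).map (fun k => (k, c)))).foldl
          (fun r p => r.insert p.1 p.2) r := by
  induction ls generalizing r with
  | nil => simp
  | cons c ls ih =>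
      simp only [List.foldl_cons, List.flatMap_cons, List.foldl_append, List.foldl_map]
      exact ih _

-- ===== VERDICT (by name: the statement is the Claim_ definition above) =====
theorem cantNumeros_spec : Claim_equal_cantNumeros := by
  intro lista _
  unfold Spec_cantNumeros cantNumeros cantNumeros_alt
  rw [pv_countA lista, PySem.Dict.foldl_insert_getD_add_one_eq_counter lista]
  simp only []
  set cs : List (Int × Int) := (PySem.Dict.counter lista).items with hcsdef
  set bk : PySem.Dict Int (List Int) :=
    cs.foldl (fun d p => d.insert p.2 (d.getD p.2 [] ++ [p.1])) PySem.Dict.empty with hbkdef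
  set mx : Int := PySem.List.maxD bk.keys (fun c => c) 0 with hmxdef
  set ks : List Int := PySem.List.pyRange mx 0 (-1) with hksdef
  have hcs : cs = (PySem.Set.ofList lista).map (fun k => (k, (lista.count k : Int))) :=
    PySem.Dict.items_counter lista
  have hkeys : bk.keys = PySem.Set.update ([] : PySem.Set Int) (cs.map (fun p => p.2)) := by
    rw [hbkdef, PySem.Dict.keys_foldl_insert_key cs (fun p => p.2)
      (fun d p => d.getD p.2 [] ++ [p.1]) PySem.Dict.empty, PySem.Dict.keys_empty]
  have hpw : ks.Pairwise (· > ·) := by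
    rw [hksdef, PySem.List.pyRange_neg_one_eq_reverse, List.pairwise_reverse]
    exact PySem.List.pairwise_lt_pyRange_one _ _
  have hmem : ∀ p ∈ cs, p.2 ∈ ks := by
    intro p hp
    rw [hksdef, PySem.List.mem_pyRange_neg_one]
    constructor
    · rw [hcs] at hp
      obtain ⟨k, hk, rfl⟩ := List.mem_map.mp hp
      have hkin : k ∈ lista := (PySem.Set.mem_ofList lista k).mp hk
      have h0 : (0 : Int) < (lista.count k : Int) := by
        exact_mod_cast List.count_pos_iff.mpr hkin
      exact h0
    · have hpk : p.2 ∈ bk.keys := by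
        rw [hkeys, PySem.Set.mem_update]
        exact Or.inr (List.mem_map.mpr ⟨p, hp, rfl⟩)
      have hne : bk.keys ≠ [] := fun h => by rw [h] at hpk; cases hpk
      rw [hmxdef]
      unfold PySem.List.maxD
      cases hmax : PySem.List.max? bk.keys (fun c => c) with
      | none => exact absurd ((PySem.List.max?_eq_none_iff _ _).mp hmax) hne
      | some m => exact PySem.List.max?_isMax hmax p.2 hpk
  have hsort : PySem.List.sorted cs (fun p => p.2) true = pvGrouped ks cs :=
    pv_sorted_eq ks cs hpw hmem
  have hnodcs : (cs.map (fun p => p.1)).Nodup := by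
    rw [hcs, List.map_map]
    simp [Function.comp_def]
  have hperm : (PySem.List.sorted cs (fun p => p.2) true).Perm cs :=
    PySem.List.sorted_perm cs _ true
  have hnods : ((PySem.List.sorted cs (fun p => p.2) true).map (fun p => p.1)).Nodup :=
    ((hperm.map (fun p => p.1)).nodup_iff).mpr hnodcs
  -- the A side: dict(sorted(...)) is the sorted items list itself
  have hA : (PySem.Dict.ofList (PySem.List.sorted cs (fun item => item.2) true)).items
      = PySem.List.sorted cs (fun p => p.2) true :=
    pv_items_update_fresh _ hnods
  -- the B side: the bucket emission produces exactly the grouped list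
  have hbucket : ∀ c, bk.getD c [] = (cs.filter (fun p => p.2 == c)).map (fun p => p.1) := by
    intro c; rw [hbkdef]; exact pv_bucket cs c
  have hflat : ks.flatMap (fun c => (bk.getD c []).map (fun k => (k, c))) = pvGrouped ks cs := by
    unfold pvGrouped
    refine List.flatMap_congr (fun c _ => ?_)
    rw [hbucket c, List.map_map]
    have : ∀ p ∈ cs.filter (fun p => p.2 == c),
        ((fun k => (k, c)) ∘ fun p => p.1) p = id p := by
      intro p hp
      have : p.2 = c := beq_iff_eq.mp (List.mem_filter.mp hp).2
      simp [← this]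
    rw [List.map_congr_left this, List.map_id]
  have hgmap : (pvGrouped ks cs).map (fun p => p.1)
      = (PySem.List.sorted cs (fun p => p.2) true).map (fun p => p.1) := by rw [hsort]
  have hB : ((ks.flatMap (fun c => (bk.getD c []).map (fun k => (k, c)))).foldl
        (fun r p => r.insert p.1 p.2) (PySem.Dict.empty : PySem.Dict Int Int)).items
      = pvGrouped ks cs := by
    rw [hflat]
    have := PySem.Dict.items_foldl_insert_fresh (pvGrouped ks cs) (fun p => p.1)
      (fun p => p.2) PySem.Dict.empty (fun a _ => PySem.Dict.contains_empty _)
      (hgmap ▸ hnods)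
    simpa [PySem.Dict.items] using this
  rw [pv_nested (fun c => bk.getD c []) ks PySem.Dict.empty, hB, hA, hsort]
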